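-- pv_equiv track=rewrite | github.com/garind-888/camilla2 | WRITE/scripts/deduplicate_references_bib.py | split_bib_entries
-- ===== SOURCE A (Python) =====
-- def split_bib_entries(text: str) -> list[str]:
--     """Split a .bib file into a list of entry strings. Uses brace balancing
--     starting at each '@' until the matching closing '}'.
--     Also returns non-entry text (e.g., leading/trailing whitespace) as-is if any.
--     """
--     entries: list[str] = []
--     i = 0
--     n = len(text)
--     # Skip leading whitespace/comments not part of entries
--     while i < n:
--         at = text.find('@', i)
--         if at == -1:
--             remainder = text[i:].strip()
--             if remainder:
--                 entries.append(text[i:])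
--             break
--         # Capture any interstitial text before the next entry
--         if at > i and text[i:at].strip():
--             entries.append(text[i:at])
--         # Find the opening '{' of this entry
--         brace_open = text.find('{', at)
--         if brace_open == -1:
--             # Malformed remainder; include and stop
--             entries.append(text[at:])
--             break
--         depth = 1
--         j = brace_open + 1
--         while j < n and depth > 0:
--             ch = text[j]
--             if ch == '{':
--                 depth += 1
--             elif ch == '}':
--                 depth -= 1
--             j += 1
--         # j is one past the closing '}' or end-of-text
--         entries.append(text[at:j])
--         i = j
--     # Normalize entries by stripping purely whitespace-only chunks
--     entries = [e for e in entries if e.strip()]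
--     return entries
-- ===== SOURCE B (Python) =====
-- def split_bib_entries(text: str) -> list[str]:
--     """Single left-to-right character scan with an explicit state machine:
--     OUTSIDE (0), SEEKING the opening brace (1), INSIDE braces (2) with a depth
--     counter. Segments are flushed as entries; whitespace-only interstitial
--     segments are dropped."""
--     entries: list[str] = []
--     state = 0
--     depth = 0
--     start = 0
--     for pos in range(len(text)):
--         ch = text[pos]
--         if state == 0:
--             if ch == '@':
--                 seg = text[start:pos]
--                 if seg.strip():
--                     entries.append(seg)
--                 start = pos
--                 state = 1
--         elif state == 1:
--             if ch == '{':
--                 state = 2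
--                 depth = 1
--         else:
--             if ch == '{':
--                 depth += 1
--             elif ch == '}':
--                 depth -= 1
--                 if depth == 0:
--                     entries.append(text[start:pos + 1])
--                     start = pos + 1
--                     state = 0
--     if state == 0:
--         tail = text[start:]
--         if tail.strip():
--             entries.append(tail)
--     else:
--         entries.append(text[start:])
--     return entries
-- ===== Notes on version B (the rewrite author's own statement) =====
-- stated objective: alternative
-- what changed: A's loop of repeated str.find('@')/str.find('{') calls plus an inner brace-counting while and a final whitespace filter is replaced by a single left-to-right character scan with an explicit three-state machine (outside / seeking '{' / inside braces with a depth counter) that flushes segments as it goes and needs no final filter.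
import Mathlib
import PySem

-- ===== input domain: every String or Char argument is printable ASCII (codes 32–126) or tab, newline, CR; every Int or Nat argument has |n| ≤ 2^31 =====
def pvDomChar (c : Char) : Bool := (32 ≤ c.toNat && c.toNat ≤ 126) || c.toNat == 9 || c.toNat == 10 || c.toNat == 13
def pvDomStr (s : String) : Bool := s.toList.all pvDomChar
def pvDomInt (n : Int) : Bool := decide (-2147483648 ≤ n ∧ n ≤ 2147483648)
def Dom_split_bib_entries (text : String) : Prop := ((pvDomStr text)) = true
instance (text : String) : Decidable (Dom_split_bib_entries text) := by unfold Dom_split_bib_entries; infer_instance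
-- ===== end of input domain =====

-- B re-implements A's repeated find/rescan splitter as one left-to-right character
-- scan with an explicit three-state machine (outside / seeking '{' / inside braces);
-- objective: alternative single-pass decomposition, same O(n) cost.

-- ===== PORT A =====

-- inner while loop of A (brace balancing); returns the index one past the closing '}'.
-- fuel is only a structural-recursion guard (callers pass enough: one unit per step);
-- text[j] is read as s[j]? = some c, exact since the loop guard keeps j < len(text)
def scanDepthA (s : List Char) (fuel j depth : Nat) : Nat :=
  match fuel with
  | 0 => j
  | fuel + 1 =>
    if j < s.length ∧ 0 < depth then
      scanDepthA s fuel (j + 1)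
        (if s[j]? = some '{' then depth + 1 else if s[j]? = some '}' then depth - 1 else depth)
    else j

-- literal port of A's outer while loop: repeatedly find '@', find '{', balance braces,
-- slice; fuel is a structural-recursion guard (i strictly grows by at least 1 per round).
-- (text[i:j] with 0 ≤ i ≤ j ported as (drop i).take (j-i), = PySem.List.slice_natCast;
--  truthiness of text[i:j].strip() ported as PySem.Chars.strip … ≠ [])
def ALoop (s : List Char) (fuel : Nat) (i : Nat) (acc : List (List Char)) :
    List (List Char) :=
  match fuel with
  | 0 => acc
  | fuel + 1 =>
    if i < s.length then
      let at_ := PySem.Chars.findFrom s ['@'] (i : Int) none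
      if at_ = -1 then
        if PySem.Chars.strip (s.drop i) ≠ [] then acc ++ [s.drop i] else acc
      else
        let a := at_.toNat
        let acc1 := if i < a ∧ PySem.Chars.strip ((s.drop i).take (a - i)) ≠ [] then
            acc ++ [(s.drop i).take (a - i)] else acc
        let bo := PySem.Chars.findFrom s ['{'] (a : Int) none
        if bo = -1 then acc1 ++ [s.drop a]
        else
          let j := scanDepthA s s.length (bo.toNat + 1) 1
          ALoop s fuel j (acc1 ++ [(s.drop a).take (j - a)])
    else acc

def split_bib_entries (text : String) : List String :=
  ((ALoop text.toList (text.toList.length + 1) 0 []).filter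
    (fun e => decide (PySem.Chars.strip e ≠ []))).map (fun e => String.ofList e)

-- ===== PORT B =====

-- literal port of B: one pass, state 0 = outside, 1 = seeking '{', 2 = inside braces.
-- fuel = number of loop iterations left (the caller passes len(text), one unit per char);
-- text[pos] is read as s[pos]? = some c, exact since pos runs over range(len(text))
def BScan (s : List Char) (fuel pos start state depth : Nat) (acc : List (List Char)) :
    List (List Char) :=
  match fuel with
  | 0 =>
    if state = 0 then
      if PySem.Chars.strip (s.drop start) ≠ [] then acc ++ [s.drop start] else acc
    else acc ++ [s.drop start]
  | fuel + 1 =>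
    if state = 0 then
      if s[pos]? = some '@' then
        let seg := (s.drop start).take (pos - start)
        BScan s fuel (pos + 1) pos 1 depth
          (if PySem.Chars.strip seg ≠ [] then acc ++ [seg] else acc)
      else BScan s fuel (pos + 1) start 0 depth acc
    else if state = 1 then
      if s[pos]? = some '{' then BScan s fuel (pos + 1) start 2 1 acc
      else BScan s fuel (pos + 1) start 1 depth acc
    else
      if s[pos]? = some '{' then BScan s fuel (pos + 1) start 2 (depth + 1) acc
      else if s[pos]? = some '}' then
        if depth - 1 = 0 then
          BScan s fuel (pos + 1) (pos + 1) 0 (depth - 1)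
            (acc ++ [(s.drop start).take (pos + 1 - start)])
        else BScan s fuel (pos + 1) start 2 (depth - 1) acc
      else BScan s fuel (pos + 1) start 2 depth acc

def split_bib_entries_alt (text : String) : List String :=
  (BScan text.toList text.toList.length 0 0 0 0 []).map (fun e => String.ofList e)

-- ===== PRECONDITION & SPEC =====
def Spec_split_bib_entries (text : String) (out : List String) : Prop := out = split_bib_entries_alt text
instance (text : String) (out : List String) : Decidable (Spec_split_bib_entries text out) := by unfold Spec_split_bib_entries; infer_instance

-- ===== CLAIM (what is proved, stated in full; the proofs are below) =====
def Claim_equal_split_bib_entries : Prop := ∀ (text : String), Dom_split_bib_entries text → Spec_split_bib_entries text (split_bib_entries text)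

-- ===== LEMMAS AND PROOFS =====

-- '[c] is a prefix of s.drop m' means the char at index m is c (used by the find lemmas)
theorem singleton_prefix_drop (s : List Char) (m : Nat) (c : Char) :
    ([c] <+: s.drop m) ↔ s[m]? = some c := by
  rw [← List.head?_drop]
  cases hd : s.drop m with
  | nil => simp
  | cons x t => simp [List.cons_prefix_cons, eq_comm]

-- facts about Python's text.find(single-char, k) when it succeeds
theorem findA_facts (s : List Char) (c : Char) (k : Nat) (hk : k ≤ s.length)
    (h : PySem.Chars.findFrom s [c] (k : Int) none ≠ -1) :
    k ≤ (PySem.Chars.findFrom s [c] (k : Int) none).toNat ∧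
      (PySem.Chars.findFrom s [c] (k : Int) none).toNat < s.length ∧
      s[(PySem.Chars.findFrom s [c] (k : Int) none).toNat]? = some c := by
  obtain ⟨h1, h2, _⟩ := PySem.Chars.findFrom_natCast_spec s [c] k hk h
  have hc : s[(PySem.Chars.findFrom s [c] (k : Int) none).toNat]? = some c :=
    (singleton_prefix_drop s _ c).1 h2
  refine ⟨?_, ?_, hc⟩
  · omega
  · exact (List.getElem?_eq_some_iff.1 hc).1

theorem strip_ne_nil (l : List Char) (c : Char) (h : c ∈ l)
    (hc : PySem.Chars.isspace c = false) : PySem.Chars.strip l ≠ [] := by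
  simp only [PySem.Chars.strip, PySem.Chars.rstrip, PySem.Chars.lstrip]
  simp only [ne_eq, List.reverse_eq_nil_iff, List.dropWhile_eq_nil_iff, List.mem_reverse]
  intro hall
  have hmem : c ∈ List.takeWhile PySem.Chars.isspace l ++ List.dropWhile PySem.Chars.isspace l := by
    rw [List.takeWhile_append_dropWhile]; exact h
  rcases List.mem_append.1 hmem with h1 | h2
  · exact absurd (List.mem_takeWhile_imp h1) (by simp [hc])
  · exact absurd (hall c h2) (by simp [hc])

theorem findA_eq_none (s : List Char) (c : Char) (k : Nat) (hk : k ≤ s.length)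
    (hno : ∀ m, k ≤ m → m < s.length → s[m]? ≠ some c) :
    PySem.Chars.findFrom s [c] (k : Int) none = -1 := by
  rw [PySem.Chars.findFrom_natCast_eq_neg_one_iff s [c] k hk]
  intro hinf
  have hc : c ∈ s.drop k := hinf.mem (List.mem_singleton_self c)
  obtain ⟨j, hj, hje⟩ := List.getElem_of_mem hc
  have hg : s[k + j]? = some c := by
    rw [← List.getElem?_drop, List.getElem?_eq_getElem hj, hje]
  exact hno (k + j) (by omega) (by simp at hj; omega) hg

theorem findA_eq (s : List Char) (c : Char) (k pos : Nat) (hk : k ≤ pos) (hp : pos < s.length)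
    (hno : ∀ m, k ≤ m → m < pos → s[m]? ≠ some c) (hc : s[pos]? = some c) :
    PySem.Chars.findFrom s [c] (k : Int) none = (pos : Int) := by
  have hne : PySem.Chars.findFrom s [c] (k : Int) none ≠ -1 := by
    rw [ne_eq, PySem.Chars.findFrom_natCast_eq_neg_one_iff s [c] k (by omega), not_not]
    have hmem : c ∈ s.drop k := by
      refine List.mem_of_getElem? (i := pos - k) ?_
      rw [List.getElem?_drop, show k + (pos - k) = pos by omega]
      exact hc
    obtain ⟨x, y, hxy⟩ := List.append_of_mem hmem
    exact ⟨x, y, by rw [hxy]; simp⟩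
  obtain ⟨h1, h2, h3⟩ := PySem.Chars.findFrom_natCast_spec s [c] k (by omega) hne
  obtain ⟨f1, f2, f3⟩ := findA_facts s c k (by omega) hne
  set F := (PySem.Chars.findFrom s [c] (k : Int) none).toNat with hF
  have hFpos : F = pos := by
    rcases Nat.lt_trichotomy F pos with h | h | h
    · exact absurd f3 (hno F f1 h)
    · exact h
    · exact absurd ((singleton_prefix_drop s pos c).2 hc) (h3 pos hk h)
  have : (0 : Int) ≤ PySem.Chars.findFrom s [c] (k : Int) none := by omega
  omega

theorem scanDepthA_ge (s : List Char) (fuel j depth : Nat) : j ≤ scanDepthA s fuel j depth := by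
  fun_induction scanDepthA <;> omega

theorem scanDepthA_stop (s : List Char) (fuel j depth : Nat) (h : s.length ≤ j) :
    scanDepthA s fuel j depth = j := by
  cases fuel with
  | zero => rfl
  | succ fuel => rw [scanDepthA, if_neg (by omega)]

theorem scanDepthA_zero_depth (s : List Char) (fuel j : Nat) : scanDepthA s fuel j 0 = j := by
  cases fuel with
  | zero => rfl
  | succ fuel => rw [scanDepthA, if_neg (by omega)]

theorem ALoop_at_end (s : List Char) (fuel i : Nat) (hi : s.length ≤ i)
    (acc : List (List Char)) : ALoop s fuel i acc = acc := by
  cases fuel with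
  | zero => rfl
  | succ fuel => rw [ALoop, if_neg (by omega)]

-- A's body after the '@' at position a has been located: find '{', balance, recurse
def ACont (s : List Char) (fuel a : Nat) (acc : List (List Char)) : List (List Char) :=
  let bo := PySem.Chars.findFrom s ['{'] (a : Int) none
  if bo = -1 then acc ++ [s.drop a]
  else
    let j := scanDepthA s s.length (bo.toNat + 1) 1
    ALoop s fuel j (acc ++ [(s.drop a).take (j - a)])

theorem ALoop_step (s : List Char) (fuel i pos : Nat) (hi : i < s.length)
    (hf : PySem.Chars.findFrom s ['@'] (i : Int) none = (pos : Int)) (acc : List (List Char)) :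
    ALoop s (fuel + 1) i acc = ACont s fuel pos
      (if i < pos ∧ PySem.Chars.strip ((s.drop i).take (pos - i)) ≠ [] then
        acc ++ [(s.drop i).take (pos - i)] else acc) := by
  rw [ALoop, if_pos hi]
  simp only [hf, ACont]
  rw [if_neg (by omega)]
  simp only [Int.toNat_natCast]

theorem ALoop_none (s : List Char) (fuel i : Nat) (hi : i < s.length)
    (hf : PySem.Chars.findFrom s ['@'] (i : Int) none = -1) (acc : List (List Char)) :
    ALoop s (fuel + 1) i acc =
      if PySem.Chars.strip (s.drop i) ≠ [] then acc ++ [s.drop i] else acc := by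
  rw [ALoop, if_pos hi]
  simp only [hf]
  simp

theorem mainInd (s : List Char) (fuel : Nat) : ∀ pos, pos ≤ s.length →
    fuel = s.length - pos →
    (∀ AF start acc, start ≤ pos → (∀ m, start ≤ m → m < pos → s[m]? ≠ some '@') →
      s.length - start < AF →
      BScan s fuel pos start 0 0 acc = ALoop s AF start acc) ∧
    (∀ AF start acc, start ≤ pos → (∀ m, start ≤ m → m < pos → s[m]? ≠ some '{') →
      s.length - start ≤ AF →
      BScan s fuel pos start 1 0 acc = ACont s AF start acc) ∧
    (∀ AF F start d acc, 1 ≤ d → s.length - pos ≤ F → s.length - pos ≤ AF →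
      BScan s fuel pos start 2 d acc =
        ALoop s AF (scanDepthA s F pos d)
          (acc ++ [(s.drop start).take (scanDepthA s F pos d - start)])) := by
  induction fuel with
  | zero =>
    intro pos hpos hk
    have hpn : pos = s.length := by omega
    subst hpn
    refine ⟨?_, ?_, ?_⟩
    · -- OUTSIDE at end of text
      intro AF start acc hs hno hAF
      rw [BScan, if_pos rfl]
      by_cases hsn : start < s.length
      · cases AF with
        | zero => omega
        | succ AF =>
          rw [ALoop_none s AF start hsn (findA_eq_none s '@' start (by omega) hno)]
      · have hdr : s.drop start = [] := List.drop_eq_nil_of_le (by omega)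
        rw [ALoop_at_end s AF start (by omega), hdr]
        simp [PySem.Chars.strip, PySem.Chars.rstrip, PySem.Chars.lstrip]
    · -- SEEKING '{' at end of text
      intro AF start acc hs hno hAF
      rw [BScan, if_neg (by decide)]
      have hf : PySem.Chars.findFrom s ['{'] (start : Int) none = -1 :=
        findA_eq_none s '{' start (by omega) (fun m h1 h2 => hno m h1 (by omega))
      simp [ACont, hf]
    · -- INSIDE braces at end of text
      intro AF F start d acc hd hF hAF
      rw [BScan, if_neg (by decide)]
      rw [scanDepthA_stop s F s.length d (le_refl _)]
      rw [ALoop_at_end s AF s.length (le_refl _)]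
      have htk : (s.drop start).take (s.length - start) = s.drop start :=
        List.take_of_length_le (by simp)
      rw [htk]
  | succ fuel IH =>
  intro pos hpos hk
  have hp : pos < s.length := by omega
  have IH' := IH (pos + 1) (by omega) (by omega)
  refine ⟨?_, ?_, ?_⟩
  · -- OUTSIDE
    intro AF start acc hs hno hAF
    rw [BScan, if_pos rfl]
    by_cases hch : s[pos]? = some '@'
    · rw [if_pos hch]
      cases AF with
      | zero => omega
      | succ AF =>
        have hseek : ∀ acc', BScan s fuel (pos + 1) pos 1 0 acc' = ACont s AF pos acc' :=
          fun acc' => IH'.2.1 AF pos acc' (by omega)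
            (fun m h1 h2 => by
              have hm : m = pos := by omega
              subst hm; rw [hch]; simp)
            (by omega)
        rw [hseek]
        rw [ALoop_step s AF start pos (by omega) (findA_eq s '@' start pos hs hp hno hch) acc]
        congr 1
        by_cases hsp : start = pos
        · subst hsp
          simp [PySem.Chars.strip, PySem.Chars.rstrip, PySem.Chars.lstrip]
        · have hlt : start < pos := by omega
          simp [hlt]
    · rw [if_neg hch]
      exact IH'.1 AF start acc (by omega)
        (fun m h1 h2 => by
          rcases Nat.lt_or_ge m pos with h | h
          · exact hno m h1 h
          · have hm : m = pos := by omega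
            subst hm; exact hch)
        hAF
  · -- SEEKING '{'
    intro AF start acc hs hno hAF
    rw [BScan, if_neg (by decide), if_pos rfl]
    by_cases hch : s[pos]? = some '{'
    · rw [if_pos hch]
      rw [IH'.2.2 AF s.length start 1 acc (le_refl 1) (by omega) (by omega)]
      have hf : PySem.Chars.findFrom s ['{'] (start : Int) none = (pos : Int) :=
        findA_eq s '{' start pos hs hp hno hch
      simp only [ACont, hf]
      rw [if_neg (by omega)]
      simp only [Int.toNat_natCast]
    · rw [if_neg hch]
      exact IH'.2.1 AF start acc (by omega)
        (fun m h1 h2 => by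
          rcases Nat.lt_or_ge m pos with h | h
          · exact hno m h1 h
          · have hm : m = pos := by omega
            subst hm; exact hch)
        hAF
  · -- INSIDE braces
    intro AF F start d acc hd hF hAF
    rw [BScan, if_neg (by decide), if_neg (by decide)]
    cases F with
    | zero => omega
    | succ F =>
    rw [scanDepthA, if_pos (show pos < s.length ∧ 0 < d from ⟨hp, by omega⟩)]
    by_cases h1 : s[pos]? = some '{'
    · rw [if_pos h1]
      rw [show (if s[pos]? = some '{' then d + 1 else if s[pos]? = some '}' then d - 1 else d)
        = d + 1 from by simp [h1]]
      exact IH'.2.2 AF F start (d + 1) acc (by omega) (by omega) (by omega)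
    · rw [if_neg h1]
      by_cases h2 : s[pos]? = some '}'
      · rw [if_pos h2]
        by_cases hd1 : d - 1 = 0
        · have hdd : d = 1 := by omega
          subst hdd
          rw [if_pos hd1]
          rw [show (if s[pos]? = some '{' then 1 + 1 else if s[pos]? = some '}' then 1 - 1
            else 1) = 1 - 1 from by simp [h1, h2]]
          rw [show (1 : Nat) - 1 = 0 from rfl]
          rw [scanDepthA_zero_depth s F (pos + 1)]
          exact IH'.1 AF (pos + 1) (acc ++ [(s.drop start).take (pos + 1 - start)])
            (le_refl _) (fun m hm1 hm2 => absurd hm2 (by omega)) (by omega)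
        · rw [if_neg hd1]
          rw [show (if s[pos]? = some '{' then d + 1 else if s[pos]? = some '}' then d - 1
            else d) = d - 1 from by simp [h1, h2]]
          exact IH'.2.2 AF F start (d - 1) acc (by omega) (by omega) (by omega)
      · rw [if_neg h2]
        rw [show (if s[pos]? = some '{' then d + 1 else if s[pos]? = some '}' then d - 1
          else d) = d from by simp [h1, h2]]
        exact IH'.2.2 AF F start d acc hd (by omega) (by omega)

theorem filter_keep (acc : List (List Char)) (e : List Char)
    (hacc : acc.filter (fun x => decide (PySem.Chars.strip x ≠ [])) = acc)
    (he : PySem.Chars.strip e ≠ []) :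
    (acc ++ [e]).filter (fun x => decide (PySem.Chars.strip x ≠ [])) = acc ++ [e] := by
  rw [List.filter_append, hacc]
  simp [he]

theorem filter_acc1 (s : List Char) (i a : Nat) (acc : List (List Char))
    (hacc : acc.filter (fun x => decide (PySem.Chars.strip x ≠ [])) = acc) :
    (if i < a ∧ PySem.Chars.strip ((s.drop i).take (a - i)) ≠ [] then
        acc ++ [(s.drop i).take (a - i)] else acc).filter
      (fun x => decide (PySem.Chars.strip x ≠ [])) =
      (if i < a ∧ PySem.Chars.strip ((s.drop i).take (a - i)) ≠ [] then
        acc ++ [(s.drop i).take (a - i)] else acc) := by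
  split_ifs with h
  · exact filter_keep acc _ hacc h.2
  · exact hacc

theorem filter_ALoop (s : List Char) (fuel i : Nat) (acc : List (List Char)) :
    acc.filter (fun x => decide (PySem.Chars.strip x ≠ [])) = acc →
    (ALoop s fuel i acc).filter (fun x => decide (PySem.Chars.strip x ≠ [])) =
      ALoop s fuel i acc := by
  fun_induction ALoop with
  | case1 i acc =>
    exact id
  | case2 i acc fuel hlen at_ hat hnz =>
    intro hacc
    exact filter_keep acc _ hacc hnz
  | case3 i acc fuel hlen at_ hat hnz =>
    exact id
  | case4 i acc fuel hlen at_ hat a acc1 bo hbo =>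
    intro hacc
    have hf := findA_facts s '@' i (le_of_lt hlen) hat
    have h0 : (s.drop ((PySem.Chars.findFrom s ['@'] (i : Int) none).toNat))[0]? = some '@' := by
      rw [List.getElem?_drop]
      simpa using hf.2.2
    have hs1 : PySem.Chars.strip
        (s.drop ((PySem.Chars.findFrom s ['@'] (i : Int) none).toNat)) ≠ [] :=
      strip_ne_nil _ '@' (List.mem_of_getElem? h0) (by decide)
    exact filter_keep _ _ (filter_acc1 s i a acc hacc) hs1
  | case5 i acc fuel hlen at_ hat a acc1 bo hbo j ih1 =>
    intro hacc
    have hf := findA_facts s '@' i (le_of_lt hlen) hat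
    have hfb := findA_facts s '{' ((PySem.Chars.findFrom s ['@'] (i : Int) none).toNat)
      (le_of_lt hf.2.1) hbo
    have hj := scanDepthA_ge s s.length
      ((PySem.Chars.findFrom s ['{']
        (((PySem.Chars.findFrom s ['@'] (i : Int) none).toNat : Nat) : Int) none).toNat + 1) 1
    have haj : a = (PySem.Chars.findFrom s ['@'] (i : Int) none).toNat := rfl
    have hjj : j = scanDepthA s s.length
      ((PySem.Chars.findFrom s ['{']
        (((PySem.Chars.findFrom s ['@'] (i : Int) none).toNat : Nat) : Int) none).toNat + 1) 1 :=
      rfl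
    have h0 : (s.drop ((PySem.Chars.findFrom s ['@'] (i : Int) none).toNat))[0]? = some '@' := by
      rw [List.getElem?_drop]
      simpa using hf.2.2
    have h0t : (((s.drop ((PySem.Chars.findFrom s ['@'] (i : Int) none).toNat)).take
        (j - a)))[0]? = some '@' := by
      rw [List.getElem?_take, if_pos (show 0 < j - a by omega)]
      exact h0
    have hs2 : PySem.Chars.strip
        ((s.drop ((PySem.Chars.findFrom s ['@'] (i : Int) none).toNat)).take (j - a)) ≠ [] :=
      strip_ne_nil _ '@' (List.mem_of_getElem? h0t) (by decide)
    exact ih1 (filter_keep _ _ (filter_acc1 s i a acc hacc) hs2)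
  | case6 i acc fuel hlen =>
    exact id

-- ===== VERDICT (by name: the statement is the Claim_ definition above) =====
theorem split_bib_entries_spec : Claim_equal_split_bib_entries := by
  intro text _
  unfold Spec_split_bib_entries split_bib_entries split_bib_entries_alt
  have h1 : BScan text.toList text.toList.length 0 0 0 0 [] =
      ALoop text.toList (text.toList.length + 1) 0 [] :=
    (mainInd text.toList text.toList.length 0 (Nat.zero_le _) (by omega)).1
      (text.toList.length + 1) 0 [] (le_refl 0) (by omega) (by omega)
  rw [filter_ALoop text.toList (text.toList.length + 1) 0 [] rfl, h1]
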